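-- pv_equiv track=rewrite | github.com/dhruvnps/google-foobar | Level 5/expanding-nebula/solution.py | cols
-- ===== SOURCE A (Python) =====
-- def cols(g):
--     cols = []
--     for idx in range(len(g[0])):
--         n = 0
--         for i in g:
--             n = (n << 1) + i[idx]
--         cols.append(n)
--     return cols
-- ===== SOURCE B (Python) =====
-- def cols(g):
--     # Row-major traversal: maintain all column bitmasks at once.
--     result = [0] * len(g[0])
--     for row in g:
--         result = [(v << 1) + b for v, b in zip(result, row)]
--     return result
-- ===== Notes on version B (the rewrite author's own statement) =====
-- stated objective: alternative
-- what changed: Transposed the traversal: instead of an outer loop over column indices each doing a full scalar scan of the rows, B makes one pass over the rows maintaining a vector of partial bitmasks updated with zip.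
import Mathlib
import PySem

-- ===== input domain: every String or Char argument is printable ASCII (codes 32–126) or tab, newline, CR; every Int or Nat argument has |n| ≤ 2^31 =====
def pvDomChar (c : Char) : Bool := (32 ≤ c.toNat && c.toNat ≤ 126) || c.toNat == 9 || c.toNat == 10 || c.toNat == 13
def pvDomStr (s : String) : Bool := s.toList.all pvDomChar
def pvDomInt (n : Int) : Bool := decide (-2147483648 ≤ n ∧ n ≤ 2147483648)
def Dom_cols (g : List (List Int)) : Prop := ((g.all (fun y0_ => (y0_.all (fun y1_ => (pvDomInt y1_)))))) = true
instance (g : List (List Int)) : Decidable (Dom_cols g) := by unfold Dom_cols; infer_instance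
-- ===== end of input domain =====

-- B changes the decomposition: one row-major pass maintaining a vector of partial
-- column bitmasks, instead of a scalar accumulator per column index (objective: alternative).

-- ===== PORT A =====
-- literal port of A: outer loop over range(len(g[0])), inner scalar fold over rows;
-- 'n << 1' is written 'n * 2' (exact for every Python int), i[idx] is pyGetD (in range under Pre_)
def cols (g : List (List Int)) : List Int :=
  (PySem.List.pyRange 0 ((PySem.List.pyGetD g 0 ([] : List Int)).length : Int) 1).foldl
    (fun acc idx =>
      acc ++ [g.foldl (fun n i => n * 2 + PySem.List.pyGetD i idx 0) 0]) []

-- ===== PORT B =====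
-- literal port of Source B: result = [0]*len(g[0]); for row in g: zip-update
def cols_alt (g : List (List Int)) : List Int :=
  g.foldl (fun res row => (res.zip row).map (fun p => p.1 * 2 + p.2))
    (List.replicate (PySem.List.pyGetD g 0 ([] : List Int)).length 0)

-- ===== PRECONDITION & SPEC =====
-- Pre_ excludes exactly the inputs on which A raises: the empty grid (g[0] is an
-- IndexError) and ragged grids with a row shorter than the first row (i[idx] raises).
def Pre_cols (g : List (List Int)) : Prop :=
  g ≠ [] ∧ ∀ r ∈ g, (g.headD []).length ≤ r.length
instance (g : List (List Int)) : Decidable (Pre_cols g) := by unfold Pre_cols; infer_instance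
def pvWitness_cols : List (List Int) := [[1, 0], [0, 1], [1, 1]]
def Spec_cols (g : List (List Int)) (out : List Int) : Prop := out = cols_alt g
instance (g : List (List Int)) (out : List Int) : Decidable (Spec_cols g out) := by unfold Spec_cols; infer_instance

-- ===== CLAIM (what is proved, stated in full; the proofs are below) =====
def Claim_equal_cols : Prop := ∀ (g : List (List Int)), Dom_cols g → Pre_cols g → Spec_cols g (cols g)

-- ===== LEMMAS AND PROOFS =====

-- recovering a list from its getD values
theorem map_range_getD (l : List Int) :
    (List.range l.length).map (fun j => l.getD j 0) = l := by
  apply List.ext_getElem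
  · simp
  · intro i h1 h2
    simp [List.getD_eq_getElem?_getD, List.getElem?_eq_getElem h2]

-- one zip-update step, pointwise
theorem zip_step_getD (res row : List Int) (h : res.length ≤ row.length) (j : Nat)
    (hj : j < res.length) :
    ((res.zip row).map (fun p : Int × Int => p.1 * 2 + p.2)).getD j 0
      = res.getD j 0 * 2 + row.getD j 0 := by
  have hz : j < (res.zip row).length := by simp [List.length_zip]; omega
  have hr : j < row.length := by omega
  simp [List.getD_eq_getElem?_getD, hj, hr, List.getElem_zip]

-- the row-major fold computes, at index j, the scalar column fold
theorem foldl_zip_eq (rows : List (List Int)) (res : List Int)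
    (h : ∀ r ∈ rows, res.length ≤ r.length) :
    rows.foldl (fun res row => (res.zip row).map (fun p : Int × Int => p.1 * 2 + p.2)) res
      = (List.range res.length).map
          (fun j => rows.foldl (fun n r => n * 2 + r.getD j 0) (res.getD j 0)) := by
  induction rows generalizing res with
  | nil => simpa using (map_range_getD res).symm
  | cons r rest ih =>
    have hr : res.length ≤ r.length := h r (by simp)
    have hlen : ((res.zip r).map (fun p : Int × Int => p.1 * 2 + p.2)).length = res.length := by
      simp [List.length_zip]; omega
    rw [List.foldl_cons, ih _ (by intro r' hr'; rw [hlen]; exact h r' (by simp [hr']))]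
    rw [hlen]
    apply List.map_congr_left
    intro j hj
    have hj' : j < res.length := List.mem_range.mp hj
    rw [zip_step_getD res r hr j hj', List.foldl_cons]

-- ===== VERDICT (by name: the statement is the Claim_ definition above) =====
theorem cols_spec : Claim_equal_cols := by
  intro g _ hpre
  obtain ⟨hne, hlen⟩ := hpre
  unfold Spec_cols cols cols_alt
  have hhead : PySem.List.pyGetD g 0 ([] : List Int) = g.headD [] := by
    cases g with
    | nil => simp at hne
    | cons a l => simp [PySem.List.pyGetD_zero_cons]
  set m := (g.headD []).length with hm
  rw [hhead]
  rw [foldl_zip_eq g (List.replicate m 0) (by intro r hr; simpa using hlen r hr)]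
  rw [PySem.List.pyRange_zero_natCast]
  rw [PySem.List.foldl_append_singleton_eq_map]
  simp only [List.nil_append, List.length_replicate, List.map_map]
  apply List.map_congr_left
  intro j hj
  have hj' : j < m := List.mem_range.mp hj
  have hz : (List.replicate m (0 : Int)).getD j 0 = 0 := by
    simp [List.getD_eq_getElem?_getD, hj']
  simp only [Function.comp, hz]
  apply PySem.List.foldl_congr_mem
  intro n r hr
  simp [PySem.List.pyGetD_natCast]
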